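-- pv_equiv track=rewrite | github.com/ayorindeadunse/cross_pub_insight | utils/comparison.py | compare_trends
-- ===== SOURCE A (Python) =====
-- from typing import Dict, List
--
-- def compare_trends(a: str, b: str) -> Dict[str, List[str]]:
--     a_set = set(tag.strip('-').strip() for tag in a.split('\n') if tag.startswith('-'))
--     b_set = set(tag.strip('-').strip() for tag in b.split('\n') if tag.startswith('-'))
--
--     return {
--         "shared": sorted(a_set & b_set),
--         "only_in_a": sorted(a_set - b_set),
--         "only_in_b": sorted(b_set - a_set)
--     }
-- ===== SOURCE B (Python) =====
-- def compare_trends(a: str, b: str):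
--     def parse(s):
--         return [tag.strip('-').strip() for tag in s.split('\n') if tag.startswith('-')]
--     ta, tb = parse(a), parse(b)
--     flags = {}
--     for t in ta:
--         flags[t] = (True, False)
--     for t in tb:
--         flags[t] = (flags.get(t, (False, False))[0], True)
--     shared, only_a, only_b = [], [], []
--     for t, (fa, fb) in flags.items():
--         if fa and fb:
--             shared.append(t)
--         elif fa:
--             only_a.append(t)
--         else:
--             only_b.append(t)
--     return {"shared": sorted(shared), "only_in_a": sorted(only_a), "only_in_b": sorted(only_b)}
-- ===== Notes on version B (the rewrite author's own statement) =====
-- stated objective: alternative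
-- what changed: Replaces the three set-algebra operations (intersection and two differences) by one origin-flag dict built over both tag lists and a single classification pass over its entries.
import Mathlib
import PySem

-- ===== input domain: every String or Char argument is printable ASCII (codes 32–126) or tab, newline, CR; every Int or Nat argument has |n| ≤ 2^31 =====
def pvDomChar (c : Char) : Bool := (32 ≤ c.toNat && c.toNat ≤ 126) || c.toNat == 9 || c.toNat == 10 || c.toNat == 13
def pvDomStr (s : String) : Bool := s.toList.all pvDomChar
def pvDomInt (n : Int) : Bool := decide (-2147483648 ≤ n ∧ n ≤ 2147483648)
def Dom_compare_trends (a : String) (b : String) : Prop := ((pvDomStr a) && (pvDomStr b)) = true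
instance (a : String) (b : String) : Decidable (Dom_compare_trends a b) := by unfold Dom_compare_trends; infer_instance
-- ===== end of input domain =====

-- B replaces A's three set-algebra operations by one origin-flag dict over both tag lists
-- and a single classification pass over its entries (objective: alternative decomposition).

-- ===== PORT A =====
-- tag.strip('-').strip() for tag in s.split('\n') if tag.startswith('-');
-- the separator "\n" is a non-empty literal, so Str.split? is always `some` (getD never fires).
def pvParseA (s : String) : List String :=
  (((PySem.Str.split? s "\n").getD []).filter (fun tag => PySem.Str.startswith tag "-")).map
    (fun tag => PySem.Str.strip (PySem.Str.stripChars tag "-"))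

def compare_trends (a : String) (b : String) : List (String × List String) :=
  let a_set : PySem.Set String := PySem.Set.ofList (pvParseA a)
  let b_set : PySem.Set String := PySem.Set.ofList (pvParseA b)
  [("shared", PySem.List.sorted (PySem.Set.inter a_set b_set) (fun x => x) false),
   ("only_in_a", PySem.List.sorted (PySem.Set.diff a_set b_set) (fun x => x) false),
   ("only_in_b", PySem.List.sorted (PySem.Set.diff b_set a_set) (fun x => x) false)]

-- ===== PORT B =====
def pvParseB (s : String) : List String :=
  (((PySem.Str.split? s "\n").getD []).filter (fun tag => PySem.Str.startswith tag "-")).map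
    (fun tag => PySem.Str.strip (PySem.Str.stripChars tag "-"))

-- the body of B's classification loop over flags.items()
def pvClassify (acc : List String × List String × List String) (p : String × Bool × Bool) :
    List String × List String × List String :=
  if p.2.1 && p.2.2 then (acc.1 ++ [p.1], acc.2.1, acc.2.2)
  else if p.2.1 then (acc.1, acc.2.1 ++ [p.1], acc.2.2)
  else (acc.1, acc.2.1, acc.2.2 ++ [p.1])

def compare_trends_alt (a : String) (b : String) : List (String × List String) :=
  let ta := pvParseB a
  let tb := pvParseB b
  let d0 : PySem.Dict String (Bool × Bool) :=
    ta.foldl (fun d t => d.insert t (true, false)) ⟨[]⟩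
  let d : PySem.Dict String (Bool × Bool) :=
    tb.foldl (fun d t => d.insert t ((d.getD t (false, false)).1, true)) d0
  let acc := d.items.foldl pvClassify ([], [], [])
  [("shared", PySem.List.sorted acc.1 (fun x => x) false),
   ("only_in_a", PySem.List.sorted acc.2.1 (fun x => x) false),
   ("only_in_b", PySem.List.sorted acc.2.2 (fun x => x) false)]

-- ===== PRECONDITION & SPEC =====
def Spec_compare_trends (a : String) (b : String) (out : List (String × List String)) : Prop := out = compare_trends_alt a b
instance (a : String) (b : String) (out : List (String × List String)) : Decidable (Spec_compare_trends a b out) := by unfold Spec_compare_trends; infer_instance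

-- ===== CLAIM (what is proved, stated in full; the proofs are below) =====
def Claim_equal_compare_trends : Prop := ∀ (a : String) (b : String), Dom_compare_trends a b → Spec_compare_trends a b (compare_trends a b)

-- ===== LEMMAS AND PROOFS =====

-- find? over a keyed map: the first hit carries the key itself
theorem pv_find_map (S : List String) (w : String → Bool × Bool) (t : String) :
    List.find? (fun p => p.1 == t) (S.map (fun k => (k, w k)))
      = (if t ∈ S then some (t, w t) else none) := by
  induction S with
  | nil => simp
  | cons x S ih =>
    by_cases hx : (x == t) = true
    · have : x = t := eq_of_beq hx
      subst this
      simp [List.find?]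
    · have hne : t ≠ x := fun h => hx (by simp [h])
      simp [List.find?, hx, ih, hne]

theorem pv_getD_map (S : List String) (w : String → Bool × Bool) (t : String) :
    (⟨S.map fun k => (k, w k)⟩ : PySem.Dict String (Bool × Bool)).getD t (false, false)
      = (if t ∈ S then w t else (false, false)) := by
  simp only [PySem.Dict.getD, PySem.Dict.get?, PySem.Dict.items, pv_find_map]
  by_cases ht : t ∈ S <;> simp [ht]

theorem pv_contains_map (S : List String) (w : String → Bool × Bool) (t : String) :
    (⟨S.map fun k => (k, w k)⟩ : PySem.Dict String (Bool × Bool)).contains t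
      = decide (t ∈ S) := by
  simp only [PySem.Dict.contains, PySem.Dict.items, List.any_map, Function.comp_def]
  rw [Bool.eq_iff_iff]
  simp [List.any_eq_true, beq_iff_eq]

theorem pv_insert_map (S : List String) (w : String → Bool × Bool) (t : String) (val : Bool × Bool) :
    (⟨S.map fun k => (k, w k)⟩ : PySem.Dict String (Bool × Bool)).insert t val
      = (if t ∈ S
          then (⟨S.map fun k => (k, if k == t then val else w k)⟩ : PySem.Dict String (Bool × Bool))
          else ⟨(S.map fun k => (k, w k)) ++ [(t, val)]⟩) := by
  simp only [PySem.Dict.insert, pv_contains_map]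
  by_cases ht : t ∈ S
  · rw [if_pos (by simpa using ht), if_pos ht]
    refine congrArg PySem.Dict.mk ?_
    show List.map _ (S.map fun k => (k, w k)) = _
    rw [List.map_map]
    refine List.map_congr_left (fun k _ => ?_)
    by_cases h : (k == t) = true
    · have := eq_of_beq h; subst this; simp [h]
    · have h' : k ≠ t := fun e => h (by simp [e])
      simp [h, h']
  · rw [if_neg (by simpa using ht), if_neg ht]

-- first dict loop: flags[t] = (True, False) for t in ta
theorem pv_fold1 (l : List String) (S : List String) :
    (l.foldl (fun d t => d.insert t (true, false))
        (⟨S.map (fun k => (k, ((true : Bool), (false : Bool))))⟩ : PySem.Dict String (Bool × Bool)))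
      = ⟨(List.foldl PySem.Set.add S l).map (fun k => (k, (true, false)))⟩ := by
  induction l generalizing S with
  | nil => rfl
  | cons t l ih =>
    simp only [List.foldl_cons, pv_insert_map]
    by_cases ht : t ∈ S
    · rw [if_pos ht]
      simp only [ite_self]
      rw [ih S]
      have : PySem.Set.add S t = S := by
        simp [PySem.Set.add, List.contains_iff_mem, ht]
      rw [this]
    · rw [if_neg ht]
      have h1 : (S.map fun k => (k, ((true : Bool), (false : Bool)))) ++ [(t, (true, false))]
          = (S ++ [t]).map fun k => (k, ((true : Bool), (false : Bool))) := by
        simp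
      rw [h1, ih (S ++ [t])]
      have : PySem.Set.add S t = S ++ [t] := by
        simp only [PySem.Set.add]
        rw [if_neg (by simpa [List.contains_iff_mem] using ht)]
      rw [this]

-- second dict loop: flags[t] = (flags.get(t, (False, False))[0], True) for t in tb
theorem pv_fold2 (l : List String) (S : List String) (fA : String → Bool) (v : String → Bool)
    (hfA : ∀ x, x ∉ S → fA x = false) :
    (l.foldl (fun d t => d.insert t ((d.getD t (false, false)).1, true))
        (⟨S.map (fun k => (k, (fA k, v k)))⟩ : PySem.Dict String (Bool × Bool)))
      = ⟨(List.foldl PySem.Set.add S l).map (fun k => (k, (fA k, v k || l.contains k)))⟩ := by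
  induction l generalizing S v with
  | nil => simp
  | cons t l ih =>
    simp only [List.foldl_cons, pv_getD_map]
    have hval : ((if t ∈ S then (fA t, v t) else ((false : Bool), (false : Bool))).1, (true : Bool))
        = (fA t, (true : Bool)) := by
      by_cases ht : t ∈ S
      · simp [ht]
      · simp [ht, hfA t ht]
    rw [hval, pv_insert_map]
    have hbool : ∀ k : String,
        ((if (k == t) = true then true else v k) || l.contains k)
          = (v k || (t :: l).contains k) := by
      intro k
      rw [List.contains_cons]
      by_cases h : (k == t) = true <;> simp [h]
    by_cases ht : t ∈ S
    · rw [if_pos ht]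
      have h1 : (S.map fun k => (k, if (k == t) = true then (fA t, true) else (fA k, v k)))
          = S.map fun k => (k, (fA k, if (k == t) = true then true else v k)) := by
        refine List.map_congr_left (fun k _ => ?_)
        by_cases h : (k == t) = true
        · have := eq_of_beq h; subst this; simp [h]
        · simp [h]
      rw [h1, ih S (fun k => if (k == t) = true then true else v k) hfA]
      have hadd : PySem.Set.add S t = S := by
        simp [PySem.Set.add, List.contains_iff_mem, ht]
      rw [hadd]
      refine congrArg PySem.Dict.mk (List.map_congr_left (fun k _ => ?_))
      rw [hbool k]
    · rw [if_neg ht]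
      have h1 : (S.map fun k => (k, (fA k, v k))) ++ [(t, (fA t, true))]
          = (S ++ [t]).map fun k => (k, (fA k, if (k == t) = true then true else v k)) := by
        rw [List.map_append]
        refine congrArg₂ _ (List.map_congr_left (fun k hk => ?_)) (by simp)
        have hne : ¬ (k == t) = true := fun h => ht (eq_of_beq h ▸ hk)
        simp [hne]
      rw [h1, ih (S ++ [t]) (fun k => if (k == t) = true then true else v k)
        (fun x hx => hfA x (fun hm => hx (List.mem_append_left _ hm)))]
      have hadd : PySem.Set.add S t = S ++ [t] := by
        simp only [PySem.Set.add]
        rw [if_neg (by simpa [List.contains_iff_mem] using ht)]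
      rw [hadd]
      refine congrArg PySem.Dict.mk (List.map_congr_left (fun k _ => ?_))
      rw [hbool k]

-- classification loop over items
theorem pv_fold3 (U : List String) (f g : String → Bool) (s0 a0 b0 : List String) :
    (U.map (fun k => (k, (f k, g k)))).foldl pvClassify (s0, a0, b0)
      = (s0 ++ U.filter (fun k => f k && g k),
         a0 ++ U.filter (fun k => f k && !g k),
         b0 ++ U.filter (fun k => !f k)) := by
  induction U generalizing s0 a0 b0 with
  | nil => simp
  | cons k U ih =>
    cases hf : f k <;> cases hg : g k <;>
      simp [pvClassify, hf, hg, ih, List.filter_cons, List.append_assoc]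

-- Set.add over an appended accumulator: the left part is inert
theorem pv_add_split (l A C : List String) :
    List.foldl PySem.Set.add (A ++ C) l
      = A ++ List.foldl (fun c x => if x ∈ A then c else PySem.Set.add c x) C l := by
  induction l generalizing C with
  | nil => rfl
  | cons x l ih =>
    simp only [List.foldl_cons]
    rw [← ih]
    refine congrArg (fun c => List.foldl PySem.Set.add c l) ?_
    by_cases hx : x ∈ A <;> by_cases hc : x ∈ C <;>
      simp [PySem.Set.add, List.contains_append, List.contains_iff_mem, hx, hc, List.append_assoc]

-- skipping elements already in A = pre-filtering them away
theorem pv_skip_filter (l C : List String) (A : List String) :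
    List.foldl (fun c x => if x ∈ A then c else PySem.Set.add c x) C l
      = List.foldl PySem.Set.add C (l.filter (fun x => !decide (x ∈ A))) := by
  induction l generalizing C with
  | nil => rfl
  | cons x l ih =>
    rw [List.filter_cons]
    by_cases hx : x ∈ A <;> simp [hx, ih]

-- dedup commutes with filter
theorem pv_filter_add (C : List String) (x : String) (p : String → Bool) :
    (PySem.Set.add C x).filter p
      = (if p x = true then PySem.Set.add (C.filter p) x else C.filter p) := by
  by_cases hc : x ∈ C <;> by_cases hp : p x = true <;>
    simp [PySem.Set.add, List.contains_iff_mem, List.mem_filter, hc, hp,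
      List.filter_append, List.filter_cons]

theorem pv_ofList_filter (l C : List String) (p : String → Bool) :
    (List.foldl PySem.Set.add C l).filter p
      = List.foldl PySem.Set.add (C.filter p) (l.filter p) := by
  induction l generalizing C with
  | nil => rfl
  | cons x l ih =>
    simp only [List.foldl_cons]
    rw [ih, pv_filter_add, List.filter_cons]
    by_cases hp : p x = true <;> simp [hp]

-- the union list: distinct a-tags then the new distinct b-tags
theorem pv_union (A l : List String) :
    List.foldl PySem.Set.add A l
      = A ++ (List.foldl PySem.Set.add [] l).filter (fun x => !decide (x ∈ A)) := by
  conv_lhs => rw [show A = A ++ ([] : List String) from (List.append_nil A).symm]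
  rw [pv_add_split, pv_skip_filter, pv_ofList_filter]
  rfl

-- list membership of the two deduplicated tag lists
theorem pv_mem_ofList (l : List String) (x : String) :
    x ∈ List.foldl PySem.Set.add ([] : List String) l ↔ x ∈ l :=
  PySem.Set.mem_ofList l x

theorem pv_contains_eq (l : List String) (x : String) :
    l.contains x = decide (x ∈ l) := by
  by_cases h : x ∈ l <;> simp [List.contains_iff_mem, h]

-- the whole pipeline, on the already-parsed tag lists
theorem pv_main (ta tb : List String) :
    [("shared", PySem.List.sorted (PySem.Set.inter (PySem.Set.ofList ta) (PySem.Set.ofList tb)) (fun x => x) false),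
     ("only_in_a", PySem.List.sorted (PySem.Set.diff (PySem.Set.ofList ta) (PySem.Set.ofList tb)) (fun x => x) false),
     ("only_in_b", PySem.List.sorted (PySem.Set.diff (PySem.Set.ofList tb) (PySem.Set.ofList ta)) (fun x => x) false)]
    = (let acc :=
        ((tb.foldl (fun d t => d.insert t ((d.getD t (false, false)).1, true))
            (ta.foldl (fun d t => d.insert t (true, false))
              (⟨[]⟩ : PySem.Dict String (Bool × Bool)))).items).foldl pvClassify ([], [], [])
       [("shared", PySem.List.sorted acc.1 (fun x => x) false),
        ("only_in_a", PySem.List.sorted acc.2.1 (fun x => x) false),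
        ("only_in_b", PySem.List.sorted acc.2.2 (fun x => x) false)]) := by
  have hA : PySem.Set.ofList ta = List.foldl PySem.Set.add ([] : List String) ta := rfl
  have hB : PySem.Set.ofList tb = List.foldl PySem.Set.add ([] : List String) tb := rfl
  -- step 1: the first dict
  have h0 : ta.foldl (fun d t => d.insert t (true, false)) (⟨[]⟩ : PySem.Dict String (Bool × Bool))
      = ⟨(List.foldl PySem.Set.add ([] : List String) ta).map (fun k => (k, (decide (k ∈ ta), false)))⟩ := by
    have h := pv_fold1 ta []
    simp only [List.map_nil] at h
    rw [h]
    exact congrArg PySem.Dict.mk (List.map_congr_left (fun k hk => by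
      simp [(pv_mem_ofList ta k).mp hk]))
  -- step 2: the second dict
  have h2 : tb.foldl (fun d t => d.insert t ((d.getD t (false, false)).1, true))
        (⟨(List.foldl PySem.Set.add ([] : List String) ta).map
            (fun k => (k, (decide (k ∈ ta), false)))⟩ : PySem.Dict String (Bool × Bool))
      = ⟨(List.foldl PySem.Set.add (List.foldl PySem.Set.add ([] : List String) ta) tb).map
          (fun k => (k, (decide (k ∈ ta), tb.contains k)))⟩ := by
    have h := pv_fold2 tb (List.foldl PySem.Set.add ([] : List String) ta)
      (fun k => decide (k ∈ ta)) (fun _ => false)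
      (fun x hx => by
        have hxta : x ∉ ta := fun h => hx ((pv_mem_ofList ta x).mpr h)
        simp [hxta])
    rw [h]
    exact congrArg PySem.Dict.mk (List.map_congr_left (fun k _ => by simp))
  -- step 3: classify
  have h3 : ((List.foldl PySem.Set.add (List.foldl PySem.Set.add ([] : List String) ta) tb).map
        (fun k => (k, (decide (k ∈ ta), tb.contains k)))).foldl pvClassify ([], [], [])
      = ((List.foldl PySem.Set.add (List.foldl PySem.Set.add ([] : List String) ta) tb).filter
            (fun k => decide (k ∈ ta) && tb.contains k),
         (List.foldl PySem.Set.add (List.foldl PySem.Set.add ([] : List String) ta) tb).filter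
            (fun k => decide (k ∈ ta) && !tb.contains k),
         (List.foldl PySem.Set.add (List.foldl PySem.Set.add ([] : List String) ta) tb).filter
            (fun k => !decide (k ∈ ta))) := by
    rw [pv_fold3]
    simp
  -- the union list
  have hU : List.foldl PySem.Set.add (List.foldl PySem.Set.add ([] : List String) ta) tb
      = List.foldl PySem.Set.add ([] : List String) ta
        ++ (List.foldl PySem.Set.add ([] : List String) tb).filter
            (fun x => !decide (x ∈ List.foldl PySem.Set.add ([] : List String) ta)) :=
    pv_union _ tb
  -- component 1: shared
  have hsh : (List.foldl PySem.Set.add (List.foldl PySem.Set.add ([] : List String) ta) tb).filter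
        (fun k => decide (k ∈ ta) && tb.contains k)
      = PySem.Set.inter (PySem.Set.ofList ta) (PySem.Set.ofList tb) := by
    rw [hU, List.filter_append]
    have hr : (((List.foldl PySem.Set.add ([] : List String) tb).filter
          (fun x => !decide (x ∈ List.foldl PySem.Set.add ([] : List String) ta))).filter
          (fun k => decide (k ∈ ta) && tb.contains k)) = [] := by
      refine List.filter_eq_nil_iff.mpr (fun x hx => ?_)
      have hxA : x ∉ List.foldl PySem.Set.add ([] : List String) ta := by
        simpa using (List.mem_filter.mp hx).2
      have hxta : x ∉ ta := fun h => hxA ((pv_mem_ofList ta x).mpr h)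
      simp [hxta]
    rw [hr, List.append_nil]
    show _ = List.filter (fun x => (PySem.Set.ofList tb).contains x) (PySem.Set.ofList ta)
    rw [hA, hB]
    refine List.filter_congr (fun k hk => ?_)
    simp [(pv_mem_ofList ta k).mp hk, pv_contains_eq, pv_mem_ofList]
  -- component 2: only_in_a
  have hoa : (List.foldl PySem.Set.add (List.foldl PySem.Set.add ([] : List String) ta) tb).filter
        (fun k => decide (k ∈ ta) && !tb.contains k)
      = PySem.Set.diff (PySem.Set.ofList ta) (PySem.Set.ofList tb) := by
    rw [hU, List.filter_append]
    have hr : (((List.foldl PySem.Set.add ([] : List String) tb).filter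
          (fun x => !decide (x ∈ List.foldl PySem.Set.add ([] : List String) ta))).filter
          (fun k => decide (k ∈ ta) && !tb.contains k)) = [] := by
      refine List.filter_eq_nil_iff.mpr (fun x hx => ?_)
      have hxA : x ∉ List.foldl PySem.Set.add ([] : List String) ta := by
        simpa using (List.mem_filter.mp hx).2
      have hxta : x ∉ ta := fun h => hxA ((pv_mem_ofList ta x).mpr h)
      simp [hxta]
    rw [hr, List.append_nil]
    show _ = List.filter (fun x => !(PySem.Set.ofList tb).contains x) (PySem.Set.ofList ta)
    rw [hA, hB]
    refine List.filter_congr (fun k hk => ?_)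
    simp [(pv_mem_ofList ta k).mp hk, pv_contains_eq, pv_mem_ofList]
  -- component 3: only_in_b
  have hob : (List.foldl PySem.Set.add (List.foldl PySem.Set.add ([] : List String) ta) tb).filter
        (fun k => !decide (k ∈ ta))
      = PySem.Set.diff (PySem.Set.ofList tb) (PySem.Set.ofList ta) := by
    rw [hU, List.filter_append]
    have hl : (List.foldl PySem.Set.add ([] : List String) ta).filter (fun k => !decide (k ∈ ta)) = [] := by
      refine List.filter_eq_nil_iff.mpr (fun x hx => ?_)
      simp [(pv_mem_ofList ta x).mp hx]
    rw [hl, List.nil_append, List.filter_filter]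
    show _ = List.filter (fun x => !(PySem.Set.ofList ta).contains x) (PySem.Set.ofList tb)
    rw [hA, hB]
    refine List.filter_congr (fun k _ => ?_)
    simp [pv_contains_eq, pv_mem_ofList]
  simp only [h0, h2, h3, hsh, hoa, hob]

-- ===== VERDICT (by name: the statement is the Claim_ definition above) =====
theorem compare_trends_spec : Claim_equal_compare_trends := by
  intro a b _
  show compare_trends a b = compare_trends_alt a b
  exact pv_main (pvParseA a) (pvParseA b)
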